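-- pv_equiv track=rewrite | github.com/tikul/fen-to-png | main.py | isValidCastle
-- ===== SOURCE A (Python) =====
-- def isValidCastle(castle):
--     if len(castle) > 4:
--         return False
--     possible = {i: 0 for i in ["K", "Q", "k", "q"]}
--     for letter in castle:
--         if letter not in possible.keys():
--             return False
--         if possible[letter]:
--             return False
--         possible[letter] = 1
--     return True
-- ===== SOURCE B (Python) =====
-- def isValidCastle(castle):
--     # Count each allowed letter; counting over the alphabet replaces A's per-character
--     # seen-dict loop: per-letter counts <= 1 rules out duplicates, and the total count
--     # matching len(castle) rules out foreign characters and over-length strings at once.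
--     counts = [castle.count(c) for c in "KQkq"]
--     return all(n <= 1 for n in counts) and sum(counts) == len(castle)
-- ===== Notes on version B (the rewrite author's own statement) =====
-- stated objective: alternative
-- what changed: Instead of scanning the string with a seen-dict and early exits, B iterates over the 4-letter alphabet, counts each letter's occurrences, and decides by arithmetic: all counts <= 1 (no duplicates) and their sum equal to len(castle) (no foreign characters, and the length bound follows for free).
import Mathlib
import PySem

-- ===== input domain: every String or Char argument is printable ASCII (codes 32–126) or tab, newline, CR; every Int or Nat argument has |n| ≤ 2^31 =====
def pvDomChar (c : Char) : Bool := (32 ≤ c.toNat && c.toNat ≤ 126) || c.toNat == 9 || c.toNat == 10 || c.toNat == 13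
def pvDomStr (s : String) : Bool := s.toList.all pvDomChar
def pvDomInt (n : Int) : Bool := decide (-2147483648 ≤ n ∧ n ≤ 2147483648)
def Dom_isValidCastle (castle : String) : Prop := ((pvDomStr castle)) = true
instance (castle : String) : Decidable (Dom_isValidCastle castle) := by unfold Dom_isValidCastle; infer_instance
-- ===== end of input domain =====

-- B replaces A's per-character seen-dict loop by counting each alphabet letter and
-- deciding arithmetically; objective: alternative (same cost, different traversal).

-- ===== PORT A =====
-- the for-loop of A over the characters, carrying the 'possible' dict
def castleLoop (possible : PySem.Dict Char Int) : List Char → Bool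
  | [] => true
  | letter :: rest =>
    if ¬ (possible.contains letter) then false
    else if possible.getD letter 0 ≠ 0 then false
    else castleLoop (possible.insert letter 1) rest

def isValidCastle (castle : String) : Bool :=
  if PySem.Str.len castle > 4 then false
  else
    -- possible = {i: 0 for i in ["K","Q","k","q"]}  (keys are single chars)
    let possible := ['K', 'Q', 'k', 'q'].foldl (fun d i => d.insert i 0) PySem.Dict.empty
    castleLoop possible castle.toList

-- ===== PORT B =====
-- castle.count(c) with a one-character needle c is exactly the character count,
-- ported as List.count over castle.toList (exact on every input).
def isValidCastle_alt (castle : String) : Bool :=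
  let counts := ['K', 'Q', 'k', 'q'].map (fun c => (castle.toList.count c : Int))
  counts.all (fun n => decide (n ≤ 1)) && decide (counts.foldl (· + ·) 0 = PySem.Str.len castle)

-- ===== PRECONDITION & SPEC =====
def Spec_isValidCastle (castle : String) (out : Bool) : Prop := out = isValidCastle_alt castle
instance (castle : String) (out : Bool) : Decidable (Spec_isValidCastle castle out) := by unfold Spec_isValidCastle; infer_instance

-- ===== CLAIM (what is proved, stated in full; the proofs are below) =====
def Claim_equal_isValidCastle : Prop := ∀ (castle : String), Dom_isValidCastle castle → Spec_isValidCastle castle (isValidCastle castle)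

-- ===== LEMMAS AND PROOFS =====

-- A's loop succeeds iff the characters are pairwise distinct and every one is an
-- unmarked key of the dict.
theorem castleLoop_iff (cs : List Char) : ∀ (d : PySem.Dict Char Int),
    castleLoop d cs = true ↔ cs.Nodup ∧ ∀ x ∈ cs, d.contains x ∧ d.getD x 0 = 0 := by
  induction cs with
  | nil => intro d; simp [castleLoop]
  | cons c rest ih =>
    intro d
    by_cases hc : d.contains c
    · by_cases hv : d.getD c 0 = 0
      · rw [show castleLoop d (c :: rest) = castleLoop (d.insert c 1) rest by
          simp [castleLoop, hc, hv]]
        rw [ih]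
        constructor
        · rintro ⟨hnd, hall⟩
          have hcr : c ∉ rest := by
            intro hmem
            have := (hall c hmem).2
            simp at this
          refine ⟨by simp [List.nodup_cons, hcr, hnd], ?_⟩
          intro x hx
          rcases List.mem_cons.mp hx with rfl | hx'
          · exact ⟨hc, hv⟩
          · have h := hall x hx'
            have hxc : x ≠ c := by
              intro h'; subst h'
              simp at h
            rw [PySem.Dict.contains_insert, PySem.Dict.getD_insert] at h
            simpa [hxc] using h
        · rintro ⟨hnd, hall⟩
          rw [List.nodup_cons] at hnd
          refine ⟨hnd.2, ?_⟩
          intro x hx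
          have h := hall x (List.mem_cons_of_mem _ hx)
          have hxc : x ≠ c := fun h' => hnd.1 (h' ▸ hx)
          rw [PySem.Dict.contains_insert, PySem.Dict.getD_insert]
          simpa [hxc] using h
      · constructor
        · intro h; exfalso; simp [castleLoop, hc, hv] at h
        · rintro ⟨_, hall⟩
          exact absurd (hall c (List.mem_cons_self)).2 hv
    · constructor
      · intro h; exfalso; simp [castleLoop, hc] at h
      · rintro ⟨_, hall⟩
        exact absurd (hall c (List.mem_cons_self)).1 hc

-- the initial dict: contains = membership in KQkq, every value 0
theorem d0_contains (x : Char) :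
    (((((PySem.Dict.empty).insert 'K' (0:Int)).insert 'Q' 0).insert 'k' 0).insert 'q' 0).contains x
      = decide (x ∈ ['K', 'Q', 'k', 'q']) := by
  simp [PySem.Dict.contains_insert, PySem.Dict.empty]
  by_cases h1 : x = 'K' <;> by_cases h2 : x = 'Q' <;> by_cases h3 : x = 'k' <;>
    by_cases h4 : x = 'q' <;> simp_all

theorem d0_getD (x : Char) :
    (((((PySem.Dict.empty).insert 'K' (0:Int)).insert 'Q' 0).insert 'k' 0).insert 'q' 0).getD x 0 = 0 := by
  simp only [PySem.Dict.getD_insert]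
  split_ifs <;> simp [PySem.Dict.getD, PySem.Dict.get?, PySem.Dict.empty]

-- the four counts sum to at most the length, with equality iff no foreign character occurs
theorem sum_counts (cs : List Char) :
    cs.count 'K' + cs.count 'Q' + cs.count 'k' + cs.count 'q' ≤ cs.length ∧
    (cs.count 'K' + cs.count 'Q' + cs.count 'k' + cs.count 'q' = cs.length ↔
      ∀ x ∈ cs, (x = 'K' ∨ x = 'Q' ∨ x = 'k' ∨ x = 'q')) := by
  induction cs with
  | nil => simp
  | cons c rest ih =>
    obtain ⟨hle, hiff⟩ := ih
    by_cases hm : c = 'K' ∨ c = 'Q' ∨ c = 'k' ∨ c = 'q'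
    · have hstep : (c :: rest).count 'K' + (c :: rest).count 'Q' +
          (c :: rest).count 'k' + (c :: rest).count 'q'
          = rest.count 'K' + rest.count 'Q' + rest.count 'k' + rest.count 'q' + 1 := by
        rcases hm with rfl | rfl | rfl | rfl <;> simp <;> omega
      constructor
      · simp only [List.length_cons]; omega
      · rw [hstep]
        simp only [List.length_cons, List.mem_cons]
        constructor
        · intro h x hx
          rcases hx with rfl | hx'
          · exact hm
          · exact hiff.mp (by omega) x hx'
        · intro h
          have := hiff.mpr (fun x hx => h x (Or.inr hx))
          omega
    · push Not at hm
      obtain ⟨hK, hQ, hk, hq⟩ := hm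
      have hstep : (c :: rest).count 'K' + (c :: rest).count 'Q' +
          (c :: rest).count 'k' + (c :: rest).count 'q'
          = rest.count 'K' + rest.count 'Q' + rest.count 'k' + rest.count 'q' := by
        simp [hK, hQ, hk, hq]
      constructor
      · simp only [List.length_cons]; omega
      · rw [hstep]
        simp only [List.length_cons]
        constructor
        · intro h; omega
        · intro h
          exact absurd (h c List.mem_cons_self) (by tauto)

-- ===== VERDICT (by name: the statement is the Claim_ definition above) =====
theorem isValidCastle_spec : Claim_equal_isValidCastle := by
  intro castle _
  unfold Spec_isValidCastle
  obtain ⟨hle, hiff⟩ := sum_counts castle.toList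
  have hlen : PySem.Str.len castle = (castle.toList.length : Int) := by
    simp [PySem.Str.len_eq]
  have hBiff : isValidCastle_alt castle = true ↔
      (castle.toList.count 'K' ≤ 1 ∧ castle.toList.count 'Q' ≤ 1 ∧
        castle.toList.count 'k' ≤ 1 ∧ castle.toList.count 'q' ≤ 1) ∧
      castle.toList.count 'K' + castle.toList.count 'Q' +
        castle.toList.count 'k' + castle.toList.count 'q' = castle.toList.length := by
    unfold isValidCastle_alt
    simp only [List.map, List.all, List.foldl, Bool.and_true, Bool.and_eq_true,
      decide_eq_true_eq, hlen]
    omega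
  have hAiff : isValidCastle castle = true ↔
      castle.toList.length ≤ 4 ∧ castle.toList.Nodup ∧
      ∀ x ∈ castle.toList, (x = 'K' ∨ x = 'Q' ∨ x = 'k' ∨ x = 'q') := by
    unfold isValidCastle
    by_cases h4 : PySem.Str.len castle > 4
    · rw [if_pos h4]
      rw [hlen] at h4
      have hgt : ¬ (castle.toList.length ≤ 4) := by exact_mod_cast not_le.mpr (by exact_mod_cast h4)
      constructor
      · intro h; exact absurd h (by simp)
      · rintro ⟨h1, -⟩; exact absurd h1 hgt
    · rw [if_neg h4]
      rw [hlen] at h4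
      have h4' : castle.toList.length ≤ 4 := by
        have := not_lt.mp h4; exact_mod_cast this
      simp only [List.foldl]
      rw [castleLoop_iff]
      simp only [d0_contains, decide_eq_true_eq, List.mem_cons, List.not_mem_nil, or_false]
      constructor
      · rintro ⟨hnd, hall⟩
        exact ⟨h4', hnd, fun x hx => (hall x hx).1⟩
      · rintro ⟨-, hnd, hall⟩
        exact ⟨hnd, fun x hx => ⟨hall x hx, d0_getD x⟩⟩
  rw [Bool.eq_iff_iff, hBiff, hAiff]
  constructor
  · rintro ⟨h4, hnd, hsub⟩
    have hcnt := List.nodup_iff_count_le_one.mp hnd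
    exact ⟨⟨hcnt _, hcnt _, hcnt _, hcnt _⟩, hiff.mpr hsub⟩
  · rintro ⟨⟨hK, hQ, hk, hq⟩, hsum⟩
    have hsub := hiff.mp hsum
    refine ⟨by omega, ?_, hsub⟩
    rw [List.nodup_iff_count_le_one]
    intro a
    by_cases ha : a = 'K' ∨ a = 'Q' ∨ a = 'k' ∨ a = 'q'
    · rcases ha with rfl | rfl | rfl | rfl <;> assumption
    · have : a ∉ castle.toList := fun h => ha (hsub a h)
      simp [List.count_eq_zero.mpr this]
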